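-- pv_equiv track=rewrite | github.com/cambuerke/Python-Coding-Course | Python Code/Exercise 09/file_analysis_cbuerke.py | find_unique_words
-- ===== SOURCE A (Python) =====
-- def find_unique_words(words):
--     set_words = sorted(set(words))
--     count = [0] * len(set_words)
--     index = 0
--
--     for i in set_words:
--         for j in words:
--             if i == j:
--                 count[index] += 1
--         index += 1
--     return set_words, count
-- ===== SOURCE B (Python) =====
-- def find_unique_words(words):
--     set_words = []
--     count = []
--     for w in sorted(words):
--         if set_words and set_words[-1] == w:
--             count[-1] += 1
--         else:
--             set_words.append(w)
--             count.append(1)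
--     return set_words, count
-- ===== Notes on version B (the rewrite author's own statement) =====
-- stated objective: faster
-- what changed: A builds sorted(set(words)) and then rescans the whole input once per unique word to count it (O(u*n)); B sorts once and counts by grouping consecutive equal words in a single pass over the sorted list (O(n log n)).
import Mathlib
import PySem

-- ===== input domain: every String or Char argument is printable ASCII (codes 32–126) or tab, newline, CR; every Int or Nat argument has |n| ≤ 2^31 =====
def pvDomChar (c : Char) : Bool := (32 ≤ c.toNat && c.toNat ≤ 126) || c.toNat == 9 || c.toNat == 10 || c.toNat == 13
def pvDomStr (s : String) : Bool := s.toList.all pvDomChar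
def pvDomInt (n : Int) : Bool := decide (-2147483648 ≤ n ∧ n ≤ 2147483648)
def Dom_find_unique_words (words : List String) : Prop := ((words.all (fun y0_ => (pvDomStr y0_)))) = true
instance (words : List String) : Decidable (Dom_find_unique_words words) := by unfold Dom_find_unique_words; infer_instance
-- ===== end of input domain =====

-- B replaces A's per-unique-word rescan of the whole input (sorted(set(words)) plus a nested
-- counting loop) by a single run-grouping pass over sorted(words).

-- ===== PORT A =====
-- A: set_words = sorted(set(words)); count = [0]*len(set_words); then
-- 'for i in set_words: for j in words: if i == j: count[index] += 1' with 'index += 1'.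
-- The loop state is the pair (count, index); 'count[index] += 1' is ported as
-- 'c.set s.2 (c.getD s.2 0 + 1)' — index is always in range (0 ≤ index < len(count)),
-- so getD/set are exact here.
def find_unique_words (words : List String) : List String × List Int :=
  let set_words := PySem.List.sorted (PySem.Set.ofList words) (fun x => x) false
  let count : List Int := List.replicate set_words.length 0
  let res := set_words.foldl
    (fun (s : List Int × Nat) i =>
      (words.foldl (fun c j => if i == j then c.set s.2 (c.getD s.2 0 + 1) else c) s.1,
       s.2 + 1))
    (count, 0)
  (set_words, res.1)

-- ===== PORT B =====
-- B: one pass over sorted(words); 'set_words and set_words[-1] == w' is the getLast? match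
-- (none = the empty-list falsy case); 'count[-1] += 1' is dropLast ++ [last + 1] — count is
-- nonempty exactly when set_words is, as in the Python.
def find_unique_words_alt (words : List String) : List String × List Int :=
  (PySem.List.sorted words (fun x => x) false).foldl
    (fun (s : List String × List Int) w =>
      match s.1.getLast? with
      | some u =>
          if u == w then (s.1, s.2.dropLast ++ [s.2.getLastD 0 + 1])
          else (s.1 ++ [w], s.2 ++ [1])
      | none => (s.1 ++ [w], s.2 ++ [1]))
    ([], [])

-- ===== PRECONDITION & SPEC =====
def Spec_find_unique_words (words : List String) (out : List String × List Int) : Prop := out = find_unique_words_alt words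
instance (words : List String) (out : List String × List Int) : Decidable (Spec_find_unique_words words out) := by unfold Spec_find_unique_words; infer_instance

-- ===== CLAIM (what is proved, stated in full; the proofs are below) =====
def Claim_equal_find_unique_words : Prop := ∀ (words : List String), Dom_find_unique_words words → Spec_find_unique_words words (find_unique_words words)

-- ===== LEMMAS AND PROOFS =====

-- A's inner loop over `words` adds `words.count i` to slot `k` of the count list.
theorem inner_fold_eq (words : List String) (i : String) (c : List Int) (k : Nat) :
    words.foldl (fun c j => if i == j then c.set k (c.getD k 0 + 1) else c) c
      = c.set k (c.getD k 0 + (words.count i : Int)) := by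
  induction words generalizing c with
  | nil =>
      simp only [List.foldl_nil, List.count_nil, Nat.cast_zero, add_zero]
      by_cases hk : k < c.length
      · rw [List.getD_eq_getElem c 0 hk, List.set_getElem_self]
      · rw [List.set_eq_of_length_le (by omega)]
  | cons j rest ih =>
      simp only [List.foldl_cons]
      by_cases hij : i = j
      · subst hij
        rw [if_pos (by simp), ih, List.count_cons_self]
        by_cases hk : k < c.length
        · have h1 : (c.set k (c.getD k 0 + 1)).getD k 0 = c.getD k 0 + 1 := by
            rw [List.getD_eq_getElem _ 0 (by simpa using hk), List.getElem_set_self,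
                List.getD_eq_getElem c 0 hk]
          rw [h1, List.set_set]; push_cast; ring_nf
        · have hle : c.length ≤ k := not_lt.mp hk
          simp [List.set_eq_of_length_le, hle]
      · rw [if_neg (by simp [hij]), ih]
        have : rest.count i = (j :: rest).count i :=
          (List.count_cons_of_ne (Ne.symm hij) (l := rest)).symm
        rw [this]

-- A's outer loop: run with count = done ++ zeros and index = done.length it fills the
-- zeros with the counts of the remaining unique words.
theorem outer_fold_eq (words : List String) (t : List String) (done : List Int) :
    t.foldl
      (fun (s : List Int × Nat) i =>
        (words.foldl (fun c j => if i == j then c.set s.2 (c.getD s.2 0 + 1) else c) s.1,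
         s.2 + 1))
      (done ++ List.replicate t.length 0, done.length)
      = (done ++ t.map (fun w => (words.count w : Int)), done.length + t.length) := by
  induction t generalizing done with
  | nil => simp
  | cons i t' ih =>
      simp only [List.foldl_cons, List.length_cons, List.replicate_succ]
      rw [inner_fold_eq]
      have hget : (done ++ 0 :: List.replicate t'.length 0).getD done.length 0 = 0 := by
        rw [List.getD_eq_getElem _ 0 (by simp), List.getElem_append_right (by omega)]
        simp
      have hset : (done ++ 0 :: List.replicate t'.length 0).set done.length
          (0 + (words.count i : Int))
          = (done ++ [(words.count i : Int)]) ++ List.replicate t'.length 0 := by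
        rw [List.set_append_right _ _ (by omega)]
        simp
      rw [hget, hset]
      have := ih (done ++ [(words.count i : Int)])
      simp only [List.length_append, List.length_singleton] at this
      rw [this]
      simp [add_assoc, add_comm 1 t'.length]

theorem A_characterization (words : List String) :
    find_unique_words words
      = (PySem.List.sorted (PySem.Set.ofList words) (fun x => x) false,
         (PySem.List.sorted (PySem.Set.ofList words) (fun x => x) false).map
           (fun w => (words.count w : Int))) := by
  unfold find_unique_words
  have := outer_fold_eq words
    (PySem.List.sorted (PySem.Set.ofList words) (fun x => x) false) []
  simp only [List.nil_append, List.length_nil] at this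
  simp only [this]

-- folding Set.add appends a subsequence of the consumed list
theorem foldl_add_sublist (xs : List String) (s : List String) :
    ∃ e, xs.foldl PySem.Set.add s = s ++ e ∧ List.Sublist e xs := by
  induction xs generalizing s with
  | nil => exact ⟨[], by simp⟩
  | cons x xs ih =>
      obtain ⟨e, he, hsub⟩ := ih (PySem.Set.add s x)
      by_cases hc : PySem.Set.contains s x = true
      · refine ⟨e, ?_, hsub.cons x⟩
        have hax : PySem.Set.add s x = s := by
          simp [PySem.Set.add, (PySem.Set.contains_iff s x).mp hc]
        rw [List.foldl_cons, he, hax]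
      · refine ⟨x :: e, ?_, hsub.cons₂ x⟩
        have hx : x ∉ s := fun h => hc ((PySem.Set.contains_iff s x).mpr h)
        have hax : PySem.Set.add s x = s ++ [x] := by simp [PySem.Set.add, hx]
        rw [List.foldl_cons, he, hax, List.append_assoc]
        rfl

theorem dedup_sublist (xs : List String) : List.Sublist (PySem.List.dedup xs) xs := by
  obtain ⟨e, he, hsub⟩ := foldl_add_sublist xs []
  have hd : PySem.List.dedup xs = xs.foldl PySem.Set.add [] := by
    rw [PySem.List.dedup_eq_ofList, PySem.Set.ofList_eq_foldl]
  rw [hd, he, List.nil_append]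
  exact hsub

theorem dedup_concat (p : List String) (x : String) :
    PySem.List.dedup (p ++ [x])
      = if x ∈ p then PySem.List.dedup p else PySem.List.dedup p ++ [x] := by
  have h1 : PySem.List.dedup (p ++ [x]) = PySem.Set.add (PySem.List.dedup p) x := by
    simp [PySem.List.dedup_eq_ofList, PySem.Set.ofList_eq_foldl, List.foldl_append]
  rw [h1, PySem.Set.add]
  by_cases hx : x ∈ p
  · rw [if_pos ((PySem.Set.contains_iff _ _).mpr ((PySem.List.mem_dedup p x).mpr hx)),
        if_pos hx]
  · rw [if_neg (by rw [PySem.Set.contains_iff, PySem.List.mem_dedup]; exact hx), if_neg hx]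

-- B's fold over any ≤-sorted list produces its ordered dedup together with the counts.
theorem B_fold_eq (ws : List String) (hs : ws.Pairwise (· ≤ ·)) :
    ws.foldl
      (fun (s : List String × List Int) w =>
        match s.1.getLast? with
        | some u =>
            if u == w then (s.1, s.2.dropLast ++ [s.2.getLastD 0 + 1])
            else (s.1 ++ [w], s.2 ++ [1])
        | none => (s.1 ++ [w], s.2 ++ [1]))
      ([], [])
      = (PySem.List.dedup ws, (PySem.List.dedup ws).map (fun w => (ws.count w : Int))) := by
  induction ws using List.reverseRecOn with
  | nil => rfl
  | append_singleton p w ih =>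
      have hpa := List.pairwise_append.mp hs
      have hp : p.Pairwise (· ≤ ·) := hpa.1
      have hall : ∀ x ∈ p, x ≤ w := fun x hx => hpa.2.2 x hx w (by simp)
      rw [List.foldl_append, ih hp, List.foldl_cons, List.foldl_nil]
      have hDsub := dedup_sublist p
      have hDpw : (PySem.List.dedup p).Pairwise (· ≤ ·) := hp.sublist hDsub
      have hDnd : (PySem.List.dedup p).Nodup := PySem.List.nodup_dedup p
      rcases hD : (PySem.List.dedup p).getLast? with _ | u
      · -- dedup p = [], hence p = []
        have hpnil : p = [] := by
          have hdnil : PySem.List.dedup p = [] := List.getLast?_eq_none_iff.mp hD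
          rcases p with _ | ⟨a, p'⟩
          · rfl
          · have ha : a ∈ PySem.List.dedup (a :: p') :=
              (PySem.List.mem_dedup _ a).mpr (by simp)
            rw [hdnil] at ha
            simp at ha
        subst hpnil
        have hdw : PySem.List.dedup [w] = [w] := by simpa using dedup_concat [] w
        rw [List.nil_append, hdw]
        simp
      · dsimp only
        have huD : u ∈ PySem.List.dedup p := List.mem_of_getLast? hD
        have hup : u ∈ p := (PySem.List.mem_dedup p u).mp huD
        have hDsplit : PySem.List.dedup p = (PySem.List.dedup p).dropLast ++ [u] := by
          have hne : PySem.List.dedup p ≠ [] := by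
            intro h; rw [h] at hD; simp at hD
          conv_lhs => rw [← List.dropLast_append_getLast hne]
          rw [List.getLast_eq_iff_getLast?_eq_some hne |>.mpr hD]
        by_cases huw : u = w
        · subst huw
          rw [if_pos (by simp)]
          rw [dedup_concat, if_pos hup]
          have hwnd : u ∉ (PySem.List.dedup p).dropLast := by
            have hnd2 := hDnd
            rw [hDsplit] at hnd2
            intro h
            exact (List.nodup_append.mp hnd2).2.2 u h u (by simp) rfl
          refine Prod.ext_iff.mpr ⟨rfl, ?_⟩
          · conv_lhs => rw [hDsplit]
            conv_rhs => rw [hDsplit]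
            rw [List.map_append, List.map_append]
            simp only [List.map_singleton]
            rw [List.dropLast_concat, List.getLastD_concat]
            congr 1
            · apply List.map_congr_left
              intro x hx
              have hxu : x ≠ u := fun h => hwnd (h ▸ hx)
              rw [List.count_append, List.count_singleton']
              simp [Ne.symm hxu]
            · rw [List.count_append, List.count_singleton']
              simp
        · rw [if_neg (by simpa using huw)]
          have hwp : w ∉ p := by
            intro hw
            have hwD : w ∈ PySem.List.dedup p := (PySem.List.mem_dedup p w).mpr hw
            have hwu : w ≤ u := by
              rw [hDsplit] at hwD
              rcases List.mem_append.mp hwD with h | h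
              · have := (List.pairwise_append.mp (hDsplit ▸ hDpw)).2.2
                exact this w h u (by simp)
              · simp at h; exact h.le
            exact huw (le_antisymm (hall u hup) hwu)
          rw [dedup_concat, if_neg hwp]
          have h1 : List.map (fun x => (((p ++ [w]).count x : Nat) : Int)) (PySem.List.dedup p)
              = List.map (fun x => ((p.count x : Nat) : Int)) (PySem.List.dedup p) := by
            apply List.map_congr_left
            intro x hx
            have hxw : x ≠ w := fun h => hwp (h ▸ (PySem.List.mem_dedup p x).mp hx)
            rw [List.count_append, List.count_singleton']
            simp [Ne.symm hxw]
          have h2 : (((p ++ [w]).count w : Nat) : Int) = 1 := by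
            rw [List.count_append, List.count_singleton']
            simp [List.count_eq_zero_of_not_mem hwp]
          rw [List.map_append, List.map_singleton, h1, h2]

-- sorted(set(words)) is exactly the ordered dedup of sorted(words)
theorem dedup_sorted_eq (words : List String) :
    PySem.List.dedup (PySem.List.sorted words (fun x => x) false)
      = PySem.List.sorted (PySem.Set.ofList words) (fun x => x) false := by
  set D := PySem.List.dedup (PySem.List.sorted words (fun x => x) false) with hDdef
  have hnd : D.Nodup := PySem.List.nodup_dedup _
  have hnd' : (PySem.Set.ofList words).Nodup := PySem.Set.nodup_ofList words
  have hmem : ∀ x, x ∈ D ↔ x ∈ PySem.Set.ofList words := by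
    intro x
    rw [hDdef, PySem.List.mem_dedup, PySem.List.mem_sorted, PySem.Set.mem_ofList]
  have hperm : D.Perm (PySem.Set.ofList words) :=
    List.perm_of_nodup_nodup_toFinset_eq hnd hnd'
      (by ext x; simp [List.mem_toFinset, hmem])
  have hle : D.Pairwise (· ≤ ·) :=
    (PySem.List.sorted_pairwise words (fun x => x)).sublist (dedup_sublist _)
  have hlt : D.Pairwise (· < ·) :=
    (hle.and hnd).imp (fun h => lt_of_le_of_ne h.1 h.2)
  exact (PySem.List.sorted_eq_of_perm_of_pairwise_lt _ _ (fun x => x) hperm hlt).symm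

-- ===== VERDICT (by name: the statement is the Claim_ definition above) =====
theorem find_unique_words_spec : Claim_equal_find_unique_words := by
  intro words _
  unfold Spec_find_unique_words find_unique_words_alt
  rw [B_fold_eq _ (PySem.List.sorted_pairwise words (fun x => x)), dedup_sorted_eq,
      A_characterization]
  have hc : ∀ w, ((PySem.List.sorted words (fun x => x) false).count w : Int)
      = (words.count w : Int) := by
    intro w
    exact_mod_cast (PySem.List.sorted_perm (xs := words) (key := fun x => x)
      (rev := false)).count_eq w
  simp only [hc]
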